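-- pv_equiv track=rewrite | github.com/AustinTSchaffer/DailyProgrammer | AdventOfCode/2022/day_19/sln.py | individual_robot_purchasing_decisions_unused
-- ===== SOURCE A (Python) =====
-- def individual_robot_purchasing_decisions_unused(cost: tuple[int, int, int], resources: tuple[int, int, int, int]) -> list[tuple[int, tuple[int, int, int, int]]]:
--     """
--     Returns a list of the possible numbers of robots that can be purchased based
--     on the cost of that robot and the number of resources available. Returns those
--     individual values as a list, tupled together with the number of resources that
--     will be remaining if the quantity is purchased.
--     """
--
--     min_ = None
--
--     if cost[0] != 0:
--         min_ = resources[0] // cost[0]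
--
--     if cost[1] != 0:
--         new_min = resources[1] // cost[1]
--         if min_ is None or new_min < min_:
--             min_ = new_min
--
--     if cost[2] != 0:
--         new_min = resources[2] // cost[2]
--         if min_ is None or new_min < min_:
--             min_ = new_min
--
--     return [
--         (qty, (
--             resources[0] - (qty * cost[0]),
--             resources[1] - (qty * cost[1]),
--             resources[2] - (qty * cost[2]),
--             resources[3],
--         ))
--         for qty in range(1, min_+1)
--     ]
-- ===== SOURCE B (Python) =====
-- def individual_robot_purchasing_decisions_unused(cost, resources):
--     # maximum affordable quantity: min over non-free resource kinds (raises on all-zero cost, like A)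
--     min_ = min(r // c for c, r in zip(cost, resources) if c != 0)
--     # walk quantities DOWNWARD from min_, reconstructing remainders by adding the cost back,
--     # then reverse the collected list once at the end
--     r0 = resources[0] - min_ * cost[0]
--     r1 = resources[1] - min_ * cost[1]
--     r2 = resources[2] - min_ * cost[2]
--     out = []
--     for qty in range(min_, 0, -1):
--         out.append((qty, (r0, r1, r2, resources[3])))
--         r0 += cost[0]
--         r1 += cost[1]
--         r2 += cost[2]
--     out.reverse()
--     return out
-- ===== Notes on version B (the rewrite author's own statement) =====
-- stated objective: alternative
-- what changed: B computes the affordability bound with min() over a zip-filtered generator and then enumerates quantities DOWNWARD from min_ to 1, reconstructing remainders incrementally by adding the cost back each step and reversing the collected list once at the end, instead of A's chained-if minimum and ascending comprehension with per-qty closed-form remainders.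
-- outside the precondition, e.g. on individual_robot_purchasing_decisions_unused((0, 0, 0), (1, 2, 3, 4)): A raises TypeError, B raises ValueError
import Mathlib
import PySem

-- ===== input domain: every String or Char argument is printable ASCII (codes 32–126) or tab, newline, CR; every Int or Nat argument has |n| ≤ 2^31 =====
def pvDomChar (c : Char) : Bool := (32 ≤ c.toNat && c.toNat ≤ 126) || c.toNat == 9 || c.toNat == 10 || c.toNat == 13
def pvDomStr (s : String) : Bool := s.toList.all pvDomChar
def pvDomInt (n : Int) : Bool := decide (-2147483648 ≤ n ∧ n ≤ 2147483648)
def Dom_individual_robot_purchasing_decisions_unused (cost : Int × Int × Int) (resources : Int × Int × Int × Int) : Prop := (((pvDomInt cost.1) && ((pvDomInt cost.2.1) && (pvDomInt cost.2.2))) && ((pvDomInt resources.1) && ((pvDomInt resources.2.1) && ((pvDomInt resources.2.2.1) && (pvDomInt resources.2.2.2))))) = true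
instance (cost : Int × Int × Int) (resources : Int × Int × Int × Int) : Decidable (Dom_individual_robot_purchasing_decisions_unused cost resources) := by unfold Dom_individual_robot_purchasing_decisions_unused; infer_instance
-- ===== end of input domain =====

-- B enumerates quantities downward from min_ with incremental remainders and a final
-- reverse, instead of A's ascending comprehension with closed-form remainders
-- (objective: alternative, same cost).

-- ===== PORT A =====
def individual_robot_purchasing_decisions_unused (cost : Int × Int × Int) (resources : Int × Int × Int × Int) : List (Int × (Int × Int × Int × Int)) :=
  let min0 : Option Int := none
  let min1 : Option Int :=
    if cost.1 ≠ 0 then some (PySem.Int.floordiv resources.1 cost.1) else min0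
  let min2 : Option Int :=
    if cost.2.1 ≠ 0 then
      match min1, PySem.Int.floordiv resources.2.1 cost.2.1 with
      | none, nm => some nm
      | some m, nm => if nm < m then some nm else some m
    else min1
  let min3 : Option Int :=
    if cost.2.2 ≠ 0 then
      match min2, PySem.Int.floordiv resources.2.2.1 cost.2.2 with
      | none, nm => some nm
      | some m, nm => if nm < m then some nm else some m
    else min2
  match min3 with
  | none => []   -- Python raises TypeError here (range(1, None+1)); excluded by Pre_
  | some m =>
    (PySem.List.pyRange 1 (m + 1) 1).map (fun qty =>
      (qty, (resources.1 - qty * cost.1,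
             resources.2.1 - qty * cost.2.1,
             resources.2.2.1 - qty * cost.2.2,
             resources.2.2.2)))

-- ===== PORT B =====
def individual_robot_purchasing_decisions_unused_alt (cost : Int × Int × Int) (resources : Int × Int × Int × Int) : List (Int × (Int × Int × Int × Int)) :=
  -- min(r // c for c, r in zip(cost, resources) if c != 0)
  let pairs : List (Int × Int) :=
    [(cost.1, resources.1), (cost.2.1, resources.2.1), (cost.2.2, resources.2.2.1)]
  let ratios : List Int := (pairs.filter (fun p => p.1 ≠ 0)).map (fun p => PySem.Int.floordiv p.2 p.1)
  match PySem.List.min? ratios (fun x => x) with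
  | none => []   -- Python min() raises ValueError on the empty generator; excluded by Pre_
  | some m =>
    -- downward loop from m to 1, adding the cost back each step, then one reverse
    ((PySem.List.pyRange m 0 (-1)).foldl
      (fun (st : (Int × Int × Int) × List (Int × (Int × Int × Int × Int))) qty =>
        ((st.1.1 + cost.1, st.1.2.1 + cost.2.1, st.1.2.2 + cost.2.2),
         st.2 ++ [(qty, (st.1.1, st.1.2.1, st.1.2.2, resources.2.2.2))]))
      ((resources.1 - m * cost.1, resources.2.1 - m * cost.2.1, resources.2.2.1 - m * cost.2.2), [])).2.reverse

-- ===== PRECONDITION & SPEC =====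
-- Pre_ excludes only cost = (0,0,0), on which A raises TypeError (range(1, None+1)) and B raises ValueError (min of an empty generator).
def Pre_individual_robot_purchasing_decisions_unused (cost : Int × Int × Int) (resources : Int × Int × Int × Int) : Prop :=
  cost.1 ≠ 0 ∨ cost.2.1 ≠ 0 ∨ cost.2.2 ≠ 0
instance (cost : Int × Int × Int) (resources : Int × Int × Int × Int) : Decidable (Pre_individual_robot_purchasing_decisions_unused cost resources) := by unfold Pre_individual_robot_purchasing_decisions_unused; infer_instance
def pvWitness_individual_robot_purchasing_decisions_unused : (Int × Int × Int) × (Int × Int × Int × Int) := ((1, 2, 3), (5, 5, 7, 9))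

def Spec_individual_robot_purchasing_decisions_unused (cost : Int × Int × Int) (resources : Int × Int × Int × Int) (out : List (Int × (Int × Int × Int × Int))) : Prop := out = individual_robot_purchasing_decisions_unused_alt cost resources
instance (cost : Int × Int × Int) (resources : Int × Int × Int × Int) (out : List (Int × (Int × Int × Int × Int))) : Decidable (Spec_individual_robot_purchasing_decisions_unused cost resources out) := by unfold Spec_individual_robot_purchasing_decisions_unused; infer_instance

-- ===== CLAIM (what is proved, stated in full; the proofs are below) =====
def Claim_equal_individual_robot_purchasing_decisions_unused : Prop := ∀ (cost : Int × Int × Int) (resources : Int × Int × Int × Int), Dom_individual_robot_purchasing_decisions_unused cost resources → Pre_individual_robot_purchasing_decisions_unused cost resources → Spec_individual_robot_purchasing_decisions_unused cost resources (individual_robot_purchasing_decisions_unused cost resources)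

-- ===== LEMMAS AND PROOFS =====

theorem pv_ite_min (m nm : Int) : (if nm < m then some nm else some m) = some (min m nm) := by
  split_ifs with h <;> simp [min_def] <;> omega

-- B's descending fold characterized: after processing [m, m-1, …, m-n+1] the collected
-- list is the descending list of (qty, remainder) pairs.
theorem pv_fold_desc (c1 c2 c3 r1 r2 r3 r4 m : Int) (n : Nat) :
    (((List.range n).map (fun k : Nat => m - (k : Int))).foldl
      (fun (st : (Int × Int × Int) × List (Int × (Int × Int × Int × Int))) qty =>
        ((st.1.1 + c1, st.1.2.1 + c2, st.1.2.2 + c3),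
         st.2 ++ [(qty, (st.1.1, st.1.2.1, st.1.2.2, r4))]))
      ((r1 - m * c1, r2 - m * c2, r3 - m * c3), []))
    = ((r1 - (m - n) * c1, r2 - (m - n) * c2, r3 - (m - n) * c3),
       (List.range n).map (fun k : Nat =>
         (m - (k : Int), (r1 - (m - k) * c1, r2 - (m - k) * c2, r3 - (m - k) * c3, r4)))) := by
  induction n with
  | zero => simp
  | succ n ih =>
    rw [List.range_succ, List.map_append, List.map_append, List.foldl_append, ih]
    simp only [List.map_cons, List.map_nil, List.foldl_cons, List.foldl_nil, Prod.mk.injEq]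
    exact ⟨⟨by push_cast; ring, by push_cast; ring, by push_cast; ring⟩, trivial⟩

-- reversing the descending list gives the ascending one (when m = n).
theorem pv_reverse_desc (g : Int → Int × (Int × Int × Int × Int)) (n : Nat) (m : Int) (hm : m = n) :
    ((List.range n).map (fun k : Nat => g (m - (k : Int)))).reverse
      = (List.range n).map (fun k : Nat => g (1 + (k : Int))) := by
  apply List.ext_getElem
  · simp
  · intro k h1 h2
    simp only [List.length_reverse, List.length_map, List.length_range] at h1 h2
    rw [List.getElem_reverse, List.getElem_map, List.getElem_map, List.getElem_range, List.getElem_range]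
    subst hm
    congr 1
    simp only [List.length_map, List.length_range]
    push_cast
    omega

theorem pv_B_fold_eq (c1 c2 c3 r1 r2 r3 r4 m : Int) :
    (((PySem.List.pyRange m 0 (-1)).foldl
      (fun (st : (Int × Int × Int) × List (Int × (Int × Int × Int × Int))) qty =>
        ((st.1.1 + c1, st.1.2.1 + c2, st.1.2.2 + c3),
         st.2 ++ [(qty, (st.1.1, st.1.2.1, st.1.2.2, r4))]))
      ((r1 - m * c1, r2 - m * c2, r3 - m * c3), [])).2).reverse
    = (PySem.List.pyRange 1 (m + 1) 1).map (fun qty =>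
        (qty, (r1 - qty * c1, r2 - qty * c2, r3 - qty * c3, r4))) := by
  rw [PySem.List.pyRange_neg_one, PySem.List.pyRange_one]
  have h0 : (m - 0) = m := by ring
  rw [h0, pv_fold_desc]
  by_cases hm : m ≤ 0
  · have ha : m.toNat = 0 := by omega
    have hb : (m + 1 - 1).toNat = 0 := by omega
    simp only [ha, hb, List.range_zero, List.map_nil, List.reverse_nil]
  · have hmn : m = (m.toNat : Int) := by omega
    have h1 : (m + 1 - 1).toNat = m.toNat := by omega
    rw [h1]
    simpa using pv_reverse_desc
      (fun q => (q, (r1 - q * c1, r2 - q * c2, r3 - q * c3, r4))) m.toNat m hmn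

-- ===== VERDICT (by name: the statement is the Claim_ definition above) =====
theorem individual_robot_purchasing_decisions_unused_spec : Claim_equal_individual_robot_purchasing_decisions_unused := by
  intro cost resources _ hpre
  obtain ⟨c1, c2, c3⟩ := cost
  obtain ⟨r1, r2, r3, r4⟩ := resources
  unfold Spec_individual_robot_purchasing_decisions_unused
  unfold individual_robot_purchasing_decisions_unused individual_robot_purchasing_decisions_unused_alt
  unfold Pre_individual_robot_purchasing_decisions_unused at hpre
  by_cases h1 : c1 = 0 <;> by_cases h2 : c2 = 0 <;> by_cases h3 : c3 = 0 <;>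
    simp only [h1, h2, h3, ne_eq, not_true_eq_false, not_false_eq_true, if_true, if_false,
      decide_true, decide_false, List.filter, pv_ite_min,
      PySem.List.min?_id_cons, List.map_cons, List.map_nil, pv_B_fold_eq,
      List.foldl_cons, List.foldl_nil, min_assoc] at hpre ⊢
  simp at hpre

theorem pv_witness_ok :
    Dom_individual_robot_purchasing_decisions_unused
      pvWitness_individual_robot_purchasing_decisions_unused.1
      pvWitness_individual_robot_purchasing_decisions_unused.2 ∧
    Pre_individual_robot_purchasing_decisions_unused
      pvWitness_individual_robot_purchasing_decisions_unused.1
      pvWitness_individual_robot_purchasing_decisions_unused.2 := by decide
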